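-- pv_equiv track=rewrite | github.com/yogzz2023/my24 | testtttt.py | is_valid_hypothesis
-- ===== SOURCE A (Python) =====
-- def is_valid_hypothesis(hypothesis):
--     report_set = set()
--     for report_idx in hypothesis:
--         if report_idx != -1:
--             if report_idx in report_set:
--                 return False
--             report_set.add(report_idx)
--     return True
-- ===== SOURCE B (Python) =====
-- def is_valid_hypothesis(hypothesis):
--     ordered = sorted(x for x in hypothesis if x != -1)
--     return all(a != b for a, b in zip(ordered, ordered[1:]))
-- ===== Notes on version B (the rewrite author's own statement) =====
-- stated objective: alternative
-- what changed: Replaced the single-pass set-membership check with early return by a sort of the non-(-1) entries followed by an adjacent-pair scan: duplicates, if any, become neighbours after sorting.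
import Mathlib
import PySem

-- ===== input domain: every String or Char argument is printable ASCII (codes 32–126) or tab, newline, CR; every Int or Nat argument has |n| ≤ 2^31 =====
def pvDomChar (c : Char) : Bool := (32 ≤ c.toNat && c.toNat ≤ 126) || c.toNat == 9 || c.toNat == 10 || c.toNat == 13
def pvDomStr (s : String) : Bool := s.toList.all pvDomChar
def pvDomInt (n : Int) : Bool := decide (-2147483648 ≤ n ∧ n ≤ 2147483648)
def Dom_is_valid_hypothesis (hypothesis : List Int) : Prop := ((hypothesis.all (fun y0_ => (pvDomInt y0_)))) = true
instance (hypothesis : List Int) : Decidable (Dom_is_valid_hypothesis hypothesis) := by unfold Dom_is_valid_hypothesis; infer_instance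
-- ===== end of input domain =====

-- B replaces A's single-pass set-membership check by sort-then-adjacent-scan (objective: alternative).

-- ===== PORT A =====
-- the for-loop over hypothesis with the growing report_set and early 'return False'
def pvLoopA : PySem.Set Int → List Int → Bool
  | _, [] => true
  | report_set, report_idx :: rest =>
    if report_idx ≠ -1 then
      if PySem.Set.contains report_set report_idx then false
      else pvLoopA (PySem.Set.add report_set report_idx) rest
    else pvLoopA report_set rest

def is_valid_hypothesis (hypothesis : List Int) : Bool :=
  pvLoopA PySem.Set.empty hypothesis

-- ===== PORT B =====
def is_valid_hypothesis_alt (hypothesis : List Int) : Bool :=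
  let ordered := PySem.List.sorted (hypothesis.filter (fun x => x ≠ -1)) (fun x => x) false
  (ordered.zip (PySem.List.slice ordered (some 1) none)).all (fun p => p.1 ≠ p.2)

-- ===== PRECONDITION & SPEC =====
def Spec_is_valid_hypothesis (hypothesis : List Int) (out : Bool) : Prop := out = is_valid_hypothesis_alt hypothesis
instance (hypothesis : List Int) (out : Bool) : Decidable (Spec_is_valid_hypothesis hypothesis out) := by unfold Spec_is_valid_hypothesis; infer_instance

-- ===== CLAIM (what is proved, stated in full; the proofs are below) =====
def Claim_equal_is_valid_hypothesis : Prop := ∀ (hypothesis : List Int), Dom_is_valid_hypothesis hypothesis → Spec_is_valid_hypothesis hypothesis (is_valid_hypothesis hypothesis)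

-- ===== LEMMAS AND PROOFS =====

-- A's loop returns true iff the non-(-1) entries are pairwise distinct and disjoint from the seed set.
theorem pvLoopA_eq_true_iff (xs : List Int) : ∀ (s : PySem.Set Int),
    pvLoopA s xs = true ↔
      ((xs.filter (fun x => x ≠ -1)).Nodup ∧ ∀ x ∈ xs.filter (fun x => x ≠ -1), x ∉ s) := by
  induction xs with
  | nil => intro s; simp [pvLoopA]
  | cons a xs ih =>
    intro s
    by_cases ha : a = -1
    · simp [pvLoopA, ha, ih]
    · by_cases hmem : a ∈ s
      · have hf : pvLoopA s (a :: xs) = false := by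
          simp [pvLoopA, ha, PySem.Set.contains, hmem]
        simp only [hf, Bool.false_eq_true, false_iff, not_and]
        intro _ h
        exact absurd hmem (h a (by simp [ha]))
      · simp only [pvLoopA, if_pos (by exact ha : a ≠ -1), PySem.Set.contains]
        rw [if_neg (by simpa using hmem), ih]
        have hfc : (a :: xs).filter (fun x => x ≠ -1) = a :: xs.filter (fun x => x ≠ -1) := by
          simp [ha]
        rw [hfc]
        simp only [List.nodup_cons, List.mem_cons, PySem.Set.mem_add, not_or]
        constructor
        · rintro ⟨hnd, hdisj⟩
          have hax : a ∉ xs.filter (fun x => x ≠ -1) := fun hx => (hdisj a hx).2 rfl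
          refine ⟨⟨hax, hnd⟩, ?_⟩
          rintro x (rfl | hx)
          · exact hmem
          · exact (hdisj x hx).1
        · rintro ⟨⟨hax, hnd⟩, hdisj⟩
          refine ⟨hnd, fun x hx => ⟨hdisj x (Or.inr hx), ?_⟩⟩
          rintro rfl
          exact hax hx

-- the adjacent-pair scan over zip l l.tail is exactly IsChain (· ≠ ·)
theorem zip_tail_all_ne_iff_chain' (l : List Int) :
    ((l.zip l.tail).all (fun p => p.1 ≠ p.2) = true) ↔ l.IsChain (· ≠ ·) := by
  induction l with
  | nil => simp
  | cons a l ih =>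
    cases l with
    | nil => simp
    | cons b l =>
      rw [List.isChain_cons_cons]
      simp only [List.tail_cons, List.zip_cons_cons, List.all_cons, Bool.and_eq_true,
        ← ih]
      simp

-- on a (≤)-sorted list, adjacent distinctness is Nodup
theorem chain'_ne_iff_nodup_of_pairwise_le (l : List Int) (hp : l.Pairwise (· ≤ ·)) :
    l.IsChain (· ≠ ·) ↔ l.Nodup := by
  constructor
  · intro hc
    have hlt : l.IsChain (· < ·) := by
      have hcle : l.IsChain (· ≤ ·) := List.isChain_iff_pairwise.mpr hp
      rw [List.isChain_iff_getElem] at hcle hc ⊢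
      intro i h
      exact lt_of_le_of_ne (hcle i h) (hc i h)
    exact (List.isChain_iff_pairwise.mp hlt).nodup
  · intro hnd
    rw [List.isChain_iff_getElem]
    intro i h
    exact (List.pairwise_iff_getElem.mp hnd) i (i + 1) (by omega) (by omega) (by omega)

-- ===== VERDICT (by name: the statement is the Claim_ definition above) =====
theorem is_valid_hypothesis_spec : Claim_equal_is_valid_hypothesis := by
  intro hypothesis _
  unfold Spec_is_valid_hypothesis is_valid_hypothesis
  simp only [is_valid_hypothesis_alt]
  rw [Bool.eq_iff_iff, pvLoopA_eq_true_iff]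
  rw [PySem.List.slice_from_one]
  rw [zip_tail_all_ne_iff_chain']
  rw [chain'_ne_iff_nodup_of_pairwise_le _ (PySem.List.sorted_pairwise _ _)]
  rw [(PySem.List.sorted_perm (hypothesis.filter (fun x => x ≠ -1)) (fun x => x) false).nodup_iff]
  simp [PySem.Set.empty]
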